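-- pv_equiv track=rewrite | github.com/ufownl/toy_chatbot | dataset.py | rnn_buckets
-- ===== SOURCE A (Python) =====
-- def rnn_buckets(dataset, buckets):
--     min_src_len = -1
--     for max_src_len in buckets:
--         src_bucket = [(src, tgt) for src, tgt in dataset if len(src) > min_src_len and len(src) <= max_src_len]
--         min_src_len = max_src_len
--         if len(src_bucket) > 0:
--             min_tgt_len = -1
--             for max_tgt_len in buckets:
--                 tgt_bucket = [(src, tgt) for src, tgt in src_bucket if len(tgt) > min_tgt_len and len(tgt) <= max_tgt_len]
--                 min_tgt_len = max_tgt_len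
--                 if len(tgt_bucket) > 0:
--                     yield tgt_bucket, max_src_len, max_tgt_len
-- ===== SOURCE B (Python) =====
-- def rnn_buckets(dataset, buckets):
--     bounds = []
--     prev = -1
--     for b in buckets:
--         bounds.append((prev, b))
--         prev = b
--     cells = {}
--     for src, tgt in dataset:
--         ls, lt = len(src), len(tgt)
--         si = [i for i, (lo, hi) in enumerate(bounds) if lo < ls <= hi]
--         ti = [j for j, (lo, hi) in enumerate(bounds) if lo < lt <= hi]
--         for i in si:
--             for j in ti:
--                 cells.setdefault((i, j), []).append((src, tgt))
--     for i, bs in enumerate(buckets):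
--         for j, bt in enumerate(buckets):
--             c = cells.get((i, j), [])
--             if c:
--                 yield c, bs, bt
-- ===== Notes on version B (the rewrite author's own statement) =====
-- stated objective: alternative
-- what changed: Instead of re-scanning the dataset (and each src bucket) once per bucket boundary in two nested bucket loops, B makes one pass over the dataset filing each pair into its (src,tgt) bucket-cell in a dict keyed by cell indices, then sweeps the cells in index order.
import Mathlib
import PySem

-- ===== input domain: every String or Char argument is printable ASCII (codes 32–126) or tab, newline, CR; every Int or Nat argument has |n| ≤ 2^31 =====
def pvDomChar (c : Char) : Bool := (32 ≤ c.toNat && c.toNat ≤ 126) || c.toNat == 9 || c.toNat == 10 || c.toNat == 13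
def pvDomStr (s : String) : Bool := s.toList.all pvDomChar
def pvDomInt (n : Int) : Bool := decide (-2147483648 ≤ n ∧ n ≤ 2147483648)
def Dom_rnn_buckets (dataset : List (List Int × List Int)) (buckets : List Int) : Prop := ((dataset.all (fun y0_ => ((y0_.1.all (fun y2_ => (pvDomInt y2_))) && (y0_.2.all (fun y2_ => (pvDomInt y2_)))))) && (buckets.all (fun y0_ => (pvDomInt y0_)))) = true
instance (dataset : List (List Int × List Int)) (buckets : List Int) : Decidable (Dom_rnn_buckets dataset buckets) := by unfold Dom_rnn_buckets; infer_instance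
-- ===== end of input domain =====

-- B replaces A's nested per-bucket rescans of the dataset by one pass that files each pair
-- into its (src,tgt) length-bucket cell in a dict, then sweeps the cells in index order (objective: alternative).

-- ===== PORT A =====
-- the shared src/tgt-length range test 'len > lo and len <= hi' of both Pythons
def pvCond (lo hi l : Int) : Bool := decide (lo < l) && decide (l ≤ hi)
def pvLenS (p : List Int × List Int) : Int := p.1.length
def pvLenT (p : List Int × List Int) : Int := p.2.length

def pvInnerStep (src_bucket : List (List Int × List Int)) (max_src_len : Int)
    (st : Int × List ((List (List Int × List Int)) × Int × Int)) (max_tgt_len : Int) :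
    Int × List ((List (List Int × List Int)) × Int × Int) :=
  let tgt_bucket := src_bucket.filter (fun p => pvCond st.1 max_tgt_len (pvLenT p))
  (max_tgt_len, if tgt_bucket.length > 0 then st.2 ++ [(tgt_bucket, max_src_len, max_tgt_len)] else st.2)

def pvOuterStep (dataset : List (List Int × List Int)) (buckets : List Int)
    (st : Int × List ((List (List Int × List Int)) × Int × Int)) (max_src_len : Int) :
    Int × List ((List (List Int × List Int)) × Int × Int) :=
  let src_bucket := dataset.filter (fun p => pvCond st.1 max_src_len (pvLenS p))
  (max_src_len,
    if src_bucket.length > 0 then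
      (buckets.foldl (pvInnerStep src_bucket max_src_len) (-1, st.2)).2
    else st.2)

def rnn_buckets (dataset : List (List Int × List Int)) (buckets : List Int) :
    List ((List (List Int × List Int)) × Int × Int) :=
  (buckets.foldl (pvOuterStep dataset buckets) (-1, [])).2

-- ===== PORT B =====
def pvBounds (buckets : List Int) : List (Int × Int) :=
  (buckets.foldl (fun (st : Int × List (Int × Int)) b => (b, st.2 ++ [(st.1, b)])) (-1, [])).2

def pvIdxs (bounds : List (Int × Int)) (l : Int) : List Int :=
  ((PySem.List.enumerate bounds 0).filter (fun x => pvCond x.2.1 x.2.2 l)).map (·.1)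

def pvAddPair (p : List Int × List Int) (si ti : List Int)
    (cells : PySem.Dict (Int × Int) (List (List Int × List Int))) :
    PySem.Dict (Int × Int) (List (List Int × List Int)) :=
  si.foldl (fun cells i =>
    ti.foldl (fun cells j => cells.insert (i, j) (cells.getD (i, j) [] ++ [p])) cells) cells

def pvCellsOf (dataset : List (List Int × List Int)) (buckets : List Int) :
    PySem.Dict (Int × Int) (List (List Int × List Int)) :=
  let bounds := pvBounds buckets
  dataset.foldl (fun cells p =>
    pvAddPair p (pvIdxs bounds (pvLenS p)) (pvIdxs bounds (pvLenT p)) cells) PySem.Dict.empty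

def rnn_buckets_alt (dataset : List (List Int × List Int)) (buckets : List Int) :
    List ((List (List Int × List Int)) × Int × Int) :=
  let cells := pvCellsOf dataset buckets
  (PySem.List.enumerate buckets 0).foldl (fun out x =>
    (PySem.List.enumerate buckets 0).foldl (fun out y =>
      let c := cells.getD (x.1, y.1) []
      if c ≠ [] then out ++ [(c, x.2, y.2)] else out) out) []

-- ===== PRECONDITION & SPEC =====
def Spec_rnn_buckets (dataset : List (List Int × List Int)) (buckets : List Int) (out : List ((List (List Int × List Int)) × Int × Int)) : Prop := out = rnn_buckets_alt dataset buckets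
instance (dataset : List (List Int × List Int)) (buckets : List Int) (out : List ((List (List Int × List Int)) × Int × Int)) : Decidable (Spec_rnn_buckets dataset buckets out) := by unfold Spec_rnn_buckets; infer_instance

-- ===== CLAIM (what is proved, stated in full; the proofs are below) =====
def Claim_equal_rnn_buckets : Prop := ∀ (dataset : List (List Int × List Int)) (buckets : List Int), Dom_rnn_buckets dataset buckets → Spec_rnn_buckets dataset buckets (rnn_buckets dataset buckets)

-- ===== LEMMAS AND PROOFS =====

-- the (min,max] interval list both programs walk: zip (-1 :: buckets) buckets
def pvZipB (bks : List Int) : List (Int × Int) := List.zip (-1 :: bks) bks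

-- one cell of the common normal form
def pvCell (ds : List (List Int × List Int)) (q r : Int × Int) : List (List Int × List Int) :=
  ds.filter (fun p => pvCond q.1 q.2 (pvLenS p) && pvCond r.1 r.2 (pvLenT p))

def pvYield (ds : List (List Int × List Int)) (q r : Int × Int) :
    List ((List (List Int × List Int)) × Int × Int) :=
  if pvCell ds q r = [] then [] else [(pvCell ds q r, q.2, r.2)]

def pvNormal (ds : List (List Int × List Int)) (bks : List Int) :
    List ((List (List Int × List Int)) × Int × Int) :=
  (pvZipB bks).flatMap (fun q => (pvZipB bks).flatMap (fun r => pvYield ds q r))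

-- ---------- A side ----------

def pvYieldT (sb : List (List Int × List Int)) (msl : Int) (r : Int × Int) :
    List ((List (List Int × List Int)) × Int × Int) :=
  let tb := sb.filter (fun p => pvCond r.1 r.2 (pvLenT p))
  if tb.length > 0 then [(tb, msl, r.2)] else []

theorem pvA_inner (sb : List (List Int × List Int)) (msl : Int) :
    ∀ (bs : List Int) (m : Int) (acc : List ((List (List Int × List Int)) × Int × Int)),
    (bs.foldl (pvInnerStep sb msl) (m, acc)).2
      = acc ++ (List.zip (m :: bs) bs).flatMap (pvYieldT sb msl) := by
  intro bs
  induction bs with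
  | nil => intro m acc; simp
  | cons b bs ih =>
    intro m acc
    show (bs.foldl (pvInnerStep sb msl) (pvInnerStep sb msl (m, acc) b)).2 = _
    have hstep : pvInnerStep sb msl (m, acc) b
        = (b, acc ++ pvYieldT sb msl (m, b)) := by
      simp only [pvInnerStep, pvYieldT]
      split_ifs <;> simp
    rw [hstep, ih]
    simp [List.zip_cons_cons, List.flatMap_cons]

theorem pvA_outer (ds : List (List Int × List Int)) (bks : List Int) :
    ∀ (bs : List Int) (m : Int) (acc : List ((List (List Int × List Int)) × Int × Int)),
    (bs.foldl (pvOuterStep ds bks) (m, acc)).2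
      = acc ++ (List.zip (m :: bs) bs).flatMap (fun q =>
          let sb := ds.filter (fun p => pvCond q.1 q.2 (pvLenS p))
          if sb.length > 0 then (pvZipB bks).flatMap (pvYieldT sb q.2) else []) := by
  intro bs
  induction bs with
  | nil => intro m acc; simp
  | cons b bs ih =>
    intro m acc
    show (bs.foldl (pvOuterStep ds bks) (pvOuterStep ds bks (m, acc) b)).2 = _
    have hstep : pvOuterStep ds bks (m, acc) b
        = (b, acc ++ (let sb := ds.filter (fun p => pvCond m b (pvLenS p))
            if sb.length > 0 then (pvZipB bks).flatMap (pvYieldT sb b) else [])) := by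
      simp only [pvOuterStep]
      split_ifs with h
      · rw [pvA_inner]; rfl
      · simp
    rw [hstep, ih]
    simp [List.zip_cons_cons, List.flatMap_cons]

theorem pvYieldT_filter (ds : List (List Int × List Int)) (q r : Int × Int) :
    pvYieldT (ds.filter (fun p => pvCond q.1 q.2 (pvLenS p))) q.2 r = pvYield ds q r := by
  simp only [pvYieldT, pvYield]
  have hcell : (ds.filter (fun p => pvCond q.1 q.2 (pvLenS p))).filter
      (fun p => pvCond r.1 r.2 (pvLenT p)) = pvCell ds q r := by
    rw [List.filter_filter, pvCell]
    exact List.filter_congr (fun p _ => Bool.and_comm _ _)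
  rw [hcell]
  rcases eq_or_ne (pvCell ds q r) [] with h | h
  · simp [h]
  · have : 0 < (pvCell ds q r).length := List.length_pos_iff.mpr h
    simp [h, this]

theorem pvA_eq_normal (ds : List (List Int × List Int)) (bks : List Int) :
    rnn_buckets ds bks = pvNormal ds bks := by
  unfold rnn_buckets pvNormal
  rw [pvA_outer]
  show (pvZipB bks).flatMap _ = _
  refine List.flatMap_congr (fun q _ => ?_)
  simp only []
  split_ifs with h
  · exact List.flatMap_congr (fun r _ => pvYieldT_filter ds q r)
  · have hsb : ds.filter (fun p => pvCond q.1 q.2 (pvLenS p)) = [] := by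
      rcases eq_or_ne (ds.filter (fun p => pvCond q.1 q.2 (pvLenS p))) [] with h' | h'
      · exact h'
      · exact absurd (List.length_pos_iff.mpr h') h
    symm
    refine List.flatMap_eq_nil_iff.mpr (fun r _ => ?_)
    rw [← pvYieldT_filter ds q r, hsb]
    simp [pvYieldT]

-- ---------- B side ----------

theorem pvBounds_aux :
    ∀ (bs : List Int) (m : Int) (acc : List (Int × Int)),
    (bs.foldl (fun (st : Int × List (Int × Int)) b => (b, st.2 ++ [(st.1, b)])) (m, acc)).2
      = acc ++ List.zip (m :: bs) bs := by
  intro bs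
  induction bs with
  | nil => intro m acc; simp
  | cons b bs ih => intro m acc; rw [List.foldl_cons, ih]; simp [List.zip_cons_cons]

theorem pvBounds_eq (bks : List Int) : pvBounds bks = pvZipB bks := by
  unfold pvBounds pvZipB; rw [pvBounds_aux]; simp

theorem pvZipB_eq_map (bks : List Int) :
    pvZipB bks = (List.range bks.length).map
      (fun k => (((-1 : Int) :: bks).getD k 0, bks.getD k 0)) := by
  unfold pvZipB
  generalize (-1 : Int) = m
  induction bks generalizing m with
  | nil => simp
  | cons b bs ih =>
    rw [List.zip_cons_cons, List.length_cons, List.range_succ_eq_map, List.map_cons, ih b]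
    simp [List.map_map, Function.comp_def]

theorem pvIdxs_nodup (bounds : List (Int × Int)) (l : Int) : (pvIdxs bounds l).Nodup := by
  unfold pvIdxs
  have h1 : ((PySem.List.enumerate bounds 0).filter
      (fun x => pvCond x.2.1 x.2.2 l)).Pairwise (fun p q => p.1 < q.1) :=
    List.Pairwise.sublist List.filter_sublist (PySem.List.pairwise_lt_enumerate bounds 0)
  have h2 := List.pairwise_map.mpr (h1.imp (fun h => h))
  exact h2.imp (fun h => ne_of_lt h)

theorem pvIdxs_mem (bounds : List (Int × Int)) (l : Int) (k : Nat) (hk : k < bounds.length) :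
    ((k : Int) ∈ pvIdxs bounds l) ↔ pvCond (bounds[k]).1 (bounds[k]).2 l = true := by
  unfold pvIdxs
  simp only [List.mem_map, List.mem_filter, PySem.List.mem_enumerate_iff]
  constructor
  · rintro ⟨x, ⟨⟨k', hk', rfl⟩, hf⟩, hx1⟩
    simp only [zero_add] at hx1 hf
    have : k' = k := by exact_mod_cast hx1
    subst this; exact hf
  · intro hf
    exact ⟨((k : Int), bounds[k]), ⟨⟨k, hk, by simp⟩, hf⟩, rfl⟩

theorem pvAddPair_inner (p : List Int × List Int) (i' : Int) :
    ∀ (ti : List Int) (d : PySem.Dict (Int × Int) (List (List Int × List Int)))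
      (i j : Int), ti.Nodup →
    ((ti.foldl (fun cells j' => cells.insert (i', j') (cells.getD (i', j') [] ++ [p])) d).getD (i, j) [])
      = d.getD (i, j) [] ++ (if i' = i ∧ j ∈ ti then [p] else []) := by
  intro ti
  induction ti with
  | nil => intro d i j _; simp
  | cons j' ti ih =>
    intro d i j hnd
    rw [List.foldl_cons, ih _ i j hnd.of_cons]
    rw [PySem.Dict.getD_insert]
    by_cases hij : (i, j) = (i', j')
    · obtain ⟨rfl, rfl⟩ := Prod.mk.injEq .. ▸ hij
      have hj : j ∉ ti := (List.nodup_cons.mp hnd).1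
      simp [hj]
    · rw [if_neg hij]
      by_cases hi : i' = i
      · subst hi
        have hj : j ≠ j' := fun h => hij (by rw [h])
        simp [hj, List.mem_cons]
      · simp [hi]

theorem pvAddPair_getD (p : List Int × List Int) :
    ∀ (si : List Int) (ti : List Int) (d : PySem.Dict (Int × Int) (List (List Int × List Int)))
      (i j : Int), si.Nodup → ti.Nodup →
    (pvAddPair p si ti d).getD (i, j) []
      = d.getD (i, j) [] ++ (if i ∈ si ∧ j ∈ ti then [p] else []) := by
  intro si
  induction si with
  | nil => intro ti d i j _ _; simp [pvAddPair]
  | cons i' si ih =>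
    intro ti d i j hns hnt
    have hrw : pvAddPair p (i' :: si) ti d
        = pvAddPair p si ti
            (ti.foldl (fun cells j' => cells.insert (i', j') (cells.getD (i', j') [] ++ [p])) d) := rfl
    rw [hrw, ih ti _ i j hns.of_cons hnt, pvAddPair_inner p i' ti d i j hnt]
    by_cases hi : i = i'
    · subst hi
      have hsi : i ∉ si := (List.nodup_cons.mp hns).1
      by_cases hj : j ∈ ti <;> simp [hsi, hj]
    · have : ¬ i' = i := fun h => hi h.symm
      by_cases hii : i ∈ si <;> by_cases hj : j ∈ ti <;>
        simp [this, hi, hii, hj, List.mem_cons]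

theorem pvCells_getD (bounds : List (Int × Int)) :
    ∀ (ds : List (List Int × List Int))
      (d : PySem.Dict (Int × Int) (List (List Int × List Int))) (i j : Int),
    ((ds.foldl (fun cells p =>
        pvAddPair p (pvIdxs bounds (pvLenS p)) (pvIdxs bounds (pvLenT p)) cells) d).getD (i, j) [])
      = d.getD (i, j) [] ++ ds.filter (fun p =>
          decide ((i ∈ pvIdxs bounds (pvLenS p)) ∧ (j ∈ pvIdxs bounds (pvLenT p)))) := by
  intro ds
  induction ds with
  | nil => intro d i j; simp
  | cons p ds ih =>
    intro d i j
    rw [List.foldl_cons, ih, pvAddPair_getD p _ _ d i j (pvIdxs_nodup _ _) (pvIdxs_nodup _ _)]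
    rw [List.filter_cons]
    by_cases hm : (i ∈ pvIdxs bounds (pvLenS p)) ∧ (j ∈ pvIdxs bounds (pvLenT p)) <;>
      simp [hm]

theorem pvEnum_eq_map (bks : List Int) :
    PySem.List.enumerate bks 0 = (List.range bks.length).map
      (fun (k : Nat) => ((k : Int), bks.getD k 0)) := by
  rw [PySem.List.enumerate_eq_map_pyRange bks 0, PySem.List.pyRange_one, List.map_map]
  have h : ((PySem.List.len bks) - 0).toNat = bks.length := by
    simp [PySem.List.len]
  rw [h]
  refine List.map_congr_left (fun k hk => ?_)
  simp

theorem pvMapFilter {A B : Type} (l : List A) (p : A → Prop) [DecidablePred p] (f : A → B) :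
    (l.filter (fun y => decide (p y))).map f = l.flatMap (fun y => if p y then [f y] else []) := by
  induction l with
  | nil => simp
  | cons a l ih => by_cases h : p a <;> simp [h, ih]

theorem pvB_eq_normal (ds : List (List Int × List Int)) (bks : List Int) :
    rnn_buckets_alt ds bks = pvNormal ds bks := by
  have hlen : (pvZipB bks).length = bks.length := by
    rw [pvZipB_eq_map]; simp
  have hget : ∀ (k : Nat) (hk : k < bks.length),
      (pvZipB bks)[k]'(by rw [hlen]; exact hk)
        = (((-1 : Int) :: bks).getD k 0, bks.getD k 0) := by
    intro k hk
    simp [pvZipB_eq_map]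
  have hcells : ∀ i j : Int, (pvCellsOf ds bks).getD (i, j) []
      = ds.filter (fun p => decide ((i ∈ pvIdxs (pvZipB bks) (pvLenS p))
          ∧ (j ∈ pvIdxs (pvZipB bks) (pvLenT p)))) := by
    intro i j
    unfold pvCellsOf
    rw [pvBounds_eq, pvCells_getD, PySem.Dict.getD_empty, List.nil_append]
  unfold rnn_buckets_alt pvNormal
  simp only [PySem.List.foldl_append_ite, PySem.List.foldl_append_eq_flatMap, List.nil_append]
  simp only [pvMapFilter]
  rw [pvEnum_eq_map, pvZipB_eq_map, List.flatMap_map, List.flatMap_map]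
  refine List.flatMap_congr (fun k hkr => ?_)
  have hk : k < bks.length := List.mem_range.mp hkr
  rw [List.flatMap_map, List.flatMap_map]
  refine List.flatMap_congr (fun k' hkr' => ?_)
  have hk' : k' < bks.length := List.mem_range.mp hkr'
  have e1 : ∀ l : Int, decide (((k : Int)) ∈ pvIdxs (pvZipB bks) l)
      = pvCond (((-1 : Int) :: bks).getD k 0) (bks.getD k 0) l := by
    intro l
    have h := pvIdxs_mem (pvZipB bks) l k (by rw [hlen]; exact hk)
    rw [hget k hk] at h
    simp [h]
  have e2 : ∀ l : Int, decide (((k' : Int)) ∈ pvIdxs (pvZipB bks) l)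
      = pvCond (((-1 : Int) :: bks).getD k' 0) (bks.getD k' 0) l := by
    intro l
    have h := pvIdxs_mem (pvZipB bks) l k' (by rw [hlen]; exact hk')
    rw [hget k' hk'] at h
    simp [h]
  have hcellk : ds.filter (fun p => decide ((((k : Int)) ∈ pvIdxs (pvZipB bks) (pvLenS p))
        ∧ (((k' : Int)) ∈ pvIdxs (pvZipB bks) (pvLenT p))))
      = pvCell ds (((-1 : Int) :: bks).getD k 0, bks.getD k 0)
          (((-1 : Int) :: bks).getD k' 0, bks.getD k' 0) := by
    unfold pvCell
    refine List.filter_congr (fun p _ => ?_)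
    rw [Bool.decide_and, e1, e2]
  simp only [hcells, hcellk]
  unfold pvYield
  rcases eq_or_ne (pvCell ds (((-1 : Int) :: bks).getD k 0, bks.getD k 0)
      (((-1 : Int) :: bks).getD k' 0, bks.getD k' 0)) [] with h | h <;> simp_all

-- ===== VERDICT (by name: the statement is the Claim_ definition above) =====
theorem rnn_buckets_spec : Claim_equal_rnn_buckets := by
  intro ds bks _
  unfold Spec_rnn_buckets
  rw [pvA_eq_normal, pvB_eq_normal]
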